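-- pv_equiv track=rewrite | github.com/cyberman/micropython-amiga-port | ports/amiga/samples/diff_view.py | pair_modifications
-- ===== SOURCE A (Python) =====
-- def pair_modifications(ops):
--     """
--     Merge adjacent del+add into 'mod' rows for nicer side-by-side display.
--     A run of K dels followed by L adds becomes:
--       min(K,L) 'mod' rows, then leftover 'del' or 'add' rows.
--     """
--     out = []
--     n = len(ops)
--     i = 0
--     while i < n:
--         if ops[i][0] == "del":
--             dels = []
--             while i < n and ops[i][0] == "del":
--                 dels.append(ops[i][1])
--                 i += 1
--             adds = []
--             while i < n and ops[i][0] == "add":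
--                 adds.append(ops[i][2])
--                 i += 1
--             k = len(dels) if len(dels) > len(adds) else len(adds)
--             for x in range(k):
--                 l = dels[x] if x < len(dels) else None
--                 r = adds[x] if x < len(adds) else None
--                 if l is not None and r is not None:
--                     out.append(("mod", l, r))
--                 elif l is not None:
--                     out.append(("del", l, None))
--                 else:
--                     out.append(("add", None, r))
--         else:
--             out.append(ops[i])
--             i += 1
--     return out
-- ===== SOURCE B (Python) =====
-- def _row(l, r):
--     if l is not None and r is not None:
--         return ("mod", l, r)
--     if l is not None:
--         return ("del", l, None)
--     return ("add", None, r)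
--
--
-- def pair_modifications(ops):
--     # One-pass state machine: `pending` holds left lines of deletions not yet
--     # paired; `in_add` says we are inside the add run that follows deletions.
--     # Rows are emitted on the fly; no run collection or positional index loop.
--     out = []
--     pending = []
--     in_add = False
--     for op in ops:
--         t = op[0]
--         if t == "del":
--             if in_add:
--                 out.extend(_row(l, None) for l in pending)
--                 pending = [op[1]]
--                 in_add = False
--             else:
--                 pending.append(op[1])
--         elif t == "add":
--             if pending:
--                 out.append(_row(pending.pop(0), op[2]))
--                 in_add = True
--             elif in_add:
--                 out.append(_row(None, op[2]))
--             else: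
--                 out.append(op)
--         else:
--             out.extend(_row(l, None) for l in pending)
--             out.append(op)
--             pending = []
--             in_add = False
--     out.extend(_row(l, None) for l in pending)
--     return out
-- ===== Notes on version B (the rewrite author's own statement) =====
-- stated objective: alternative
-- what changed: B replaces A's run-collecting while loops and positional range(max) pairing loop with a single streaming pass: a state machine carrying a FIFO of pending deletion lines and an in-add-run flag, emitting each row as soon as it can be classified.
import Mathlib
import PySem

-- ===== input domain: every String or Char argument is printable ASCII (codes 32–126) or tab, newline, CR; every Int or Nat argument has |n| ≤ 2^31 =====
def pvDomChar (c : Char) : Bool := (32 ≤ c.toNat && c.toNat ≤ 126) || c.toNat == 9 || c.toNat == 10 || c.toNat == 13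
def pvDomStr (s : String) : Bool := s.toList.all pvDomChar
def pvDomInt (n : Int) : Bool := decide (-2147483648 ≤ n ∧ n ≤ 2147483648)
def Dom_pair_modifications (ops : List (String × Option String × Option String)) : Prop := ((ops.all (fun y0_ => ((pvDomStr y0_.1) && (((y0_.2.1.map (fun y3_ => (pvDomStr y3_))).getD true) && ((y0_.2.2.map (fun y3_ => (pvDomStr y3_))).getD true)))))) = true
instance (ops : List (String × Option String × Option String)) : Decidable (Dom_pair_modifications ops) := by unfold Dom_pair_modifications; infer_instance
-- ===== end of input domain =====

-- B is a one-pass state machine (pending-del FIFO + in-add flag) instead of A's run collection with a positional pairing loop; same O(n) cost, different decomposition.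

-- ===== PORT A =====
-- inner `while … == "del"` loop: collects ops[i][1] while the type is "del", returns the rest
def pvCollectDels : List (String × Option String × Option String) → List (Option String) × List (String × Option String × Option String)
  | [] => ([], [])
  | o :: rest =>
    if o.1 == "del" then
      let p := pvCollectDels rest
      (o.2.1 :: p.1, p.2)
    else ([], o :: rest)

-- inner `while … == "add"` loop: collects ops[i][2] while the type is "add", returns the rest
def pvCollectAdds : List (String × Option String × Option String) → List (Option String) × List (String × Option String × Option String)
  | [] => ([], [])
  | o :: rest =>
    if o.1 == "add" then
      let p := pvCollectAdds rest
      (o.2.2 :: p.1, p.2)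
    else ([], o :: rest)

-- A's `for x in range(k)` pairing loop
def pvEmitA (dels adds : List (Option String)) : List (String × Option String × Option String) :=
  let k := if dels.length > adds.length then dels.length else adds.length
  (List.range k).map (fun x =>
    let l := dels.getD x none
    let r := adds.getD x none
    if l.isSome && r.isSome then ("mod", l, r)
    else if l.isSome then ("del", l, none)
    else ("add", none, r))

theorem pvCollectDels_len_le : ∀ (l : List (String × Option String × Option String)), (pvCollectDels l).2.length ≤ l.length := by
  intro l; induction l with
  | nil => simp [pvCollectDels]
  | cons o rest ih => by_cases h : (o.1 == "del") = true <;> simp [pvCollectDels, h] <;> omega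

theorem pvCollectAdds_len_le : ∀ (l : List (String × Option String × Option String)), (pvCollectAdds l).2.length ≤ l.length := by
  intro l; induction l with
  | nil => simp [pvCollectAdds]
  | cons o rest ih => by_cases h : (o.1 == "add") = true <;> simp [pvCollectAdds, h] <;> omega

-- the outer `while i < n` loop of A
def pair_modifications (ops : List (String × Option String × Option String)) : List (String × Option String × Option String) :=
  match ops with
  | [] => []
  | op :: rest =>
    if h : (op.1 == "del") = true then
      let p1 := pvCollectDels (op :: rest)
      let p2 := pvCollectAdds p1.2
      pvEmitA p1.1 p2.1 ++ pair_modifications p2.2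
    else op :: pair_modifications rest
termination_by ops.length
decreasing_by
  · have h1 : (pvCollectDels (op :: rest)).2.length ≤ rest.length := by
      simp [pvCollectDels, h]; exact pvCollectDels_len_le rest
    have h2 := pvCollectAdds_len_le (pvCollectDels (op :: rest)).2
    simp only [List.length_cons]; omega
  · simp

-- ===== PORT B =====
-- Source B's _row classifier
def pvRow (l r : Option String) : String × Option String × Option String :=
  if l.isSome && r.isSome then ("mod", l, r)
  else if l.isSome then ("del", l, none)
  else ("add", none, r)

-- Source B's loop body: state = (out, pending del lines, in_add flag)
def pvStep (st : List (String × Option String × Option String) × List (Option String) × Bool)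
    (op : String × Option String × Option String) :
    List (String × Option String × Option String) × List (Option String) × Bool :=
  if op.1 == "del" then
    if st.2.2 then (st.1 ++ st.2.1.map (fun l => pvRow l none), [op.2.1], false)
    else (st.1, st.2.1 ++ [op.2.1], st.2.2)
  else if op.1 == "add" then
    match st.2.1 with
    | l :: ps => (st.1 ++ [pvRow l op.2.2], ps, true)
    | [] =>
      if st.2.2 then (st.1 ++ [pvRow none op.2.2], [], true)
      else (st.1 ++ [op], [], st.2.2)
  else (st.1 ++ st.2.1.map (fun l => pvRow l none) ++ [op], [], false)

-- the trailing `out.extend(_row(l, None) for l in pending)` flush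
def pvFinish (st : List (String × Option String × Option String) × List (Option String) × Bool) : List (String × Option String × Option String) :=
  st.1 ++ st.2.1.map (fun l => pvRow l none)

def pair_modifications_alt (ops : List (String × Option String × Option String)) : List (String × Option String × Option String) :=
  pvFinish (ops.foldl pvStep ([], [], false))

-- ===== PRECONDITION & SPEC =====
def Spec_pair_modifications (ops : List (String × Option String × Option String)) (out : List (String × Option String × Option String)) : Prop := out = pair_modifications_alt ops
instance (ops : List (String × Option String × Option String)) (out : List (String × Option String × Option String)) : Decidable (Spec_pair_modifications ops out) := by unfold Spec_pair_modifications; infer_instance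

-- ===== CLAIM (what is proved, stated in full; the proofs are below) =====
def Claim_equal_pair_modifications : Prop := ∀ (ops : List (String × Option String × Option String)), Dom_pair_modifications ops → Spec_pair_modifications ops (pair_modifications ops)

-- ===== LEMMAS AND PROOFS =====

-- zip + leftover normal form of A's pairing loop (proof-side helper)
def pvPairB (dels adds : List (Option String)) : List (String × Option String × Option String) :=
  (List.zipWith pvRow dels adds)
    ++ (dels.drop adds.length).map (fun l => pvRow l none)
    ++ (adds.drop dels.length).map (fun r => pvRow none r)

theorem emitA_eq_rowmap (dels adds : List (Option String)) :
    pvEmitA dels adds =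
      (List.range (if dels.length > adds.length then dels.length else adds.length)).map
        (fun x => pvRow (dels.getD x none) (adds.getD x none)) := by
  simp [pvEmitA, pvRow]

theorem range_map_getD {alpha : Type} (f : Option String → alpha) :
    ∀ (xs : List (Option String)),
      (List.range xs.length).map (fun x => f (xs.getD x none)) = xs.map f := by
  intro xs; induction xs with
  | nil => simp
  | cons x xs ih =>
      simp only [List.length_cons, List.range_succ_eq_map, List.map_cons, List.map_map]
      simp only [List.getD_cons_zero]
      refine congrArg (f x :: ·) ?_
      simpa [Function.comp] using ih

-- A's pairing loop computes the zip + leftover normal form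
theorem pairAB_eq : ∀ (dels adds : List (Option String)), pvEmitA dels adds = pvPairB dels adds := by
  intro dels; induction dels with
  | nil =>
      intro adds
      rw [emitA_eq_rowmap]
      have h : (if ([] : List (Option String)).length > adds.length then ([] : List (Option String)).length else adds.length) = adds.length := by
        simp
      rw [h]
      simpa [pvPairB] using range_map_getD (fun r => pvRow none r) adds
  | cons d ds ih =>
      intro adds
      cases adds with
      | nil =>
          rw [emitA_eq_rowmap]
          have h : (if (d :: ds).length > ([] : List (Option String)).length then (d :: ds).length else ([] : List (Option String)).length) = (d :: ds).length := by
            simp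
          rw [h]
          simpa [pvPairB] using range_map_getD (fun l => pvRow l none) (d :: ds)
      | cons a as =>
          rw [emitA_eq_rowmap]
          have hk : (if (d :: ds).length > (a :: as).length then (d :: ds).length else (a :: as).length)
              = (if ds.length > as.length then ds.length else as.length) + 1 := by
            simp only [List.length_cons]; split_ifs <;> omega
          rw [hk, List.range_succ_eq_map, List.map_cons, List.map_map]
          have htl : (List.range (if ds.length > as.length then ds.length else as.length)).map
              ((fun x => pvRow ((d :: ds).getD x none) ((a :: as).getD x none)) ∘ Nat.succ)
              = pvEmitA ds as := by
            rw [emitA_eq_rowmap]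
            refine List.map_congr_left ?_
            intro x _; simp [Function.comp]
          rw [htl, ih as]
          simp [pvPairB]

-- A's inner del-collection loop = takeWhile/dropWhile
theorem collectDels_eq : ∀ (l : List (String × Option String × Option String)),
    pvCollectDels l = ((l.takeWhile (fun o => o.1 == "del")).map (fun o => o.2.1),
                       l.dropWhile (fun o => o.1 == "del")) := by
  intro l; induction l with
  | nil => simp [pvCollectDels]
  | cons o rest ih =>
      by_cases h : (o.1 == "del") = true
      · simp [pvCollectDels, h, ih]
      · simp at h
        simp [pvCollectDels, h]

-- A's inner add-collection loop = takeWhile/dropWhile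
theorem collectAdds_eq : ∀ (l : List (String × Option String × Option String)),
    pvCollectAdds l = ((l.takeWhile (fun o => o.1 == "add")).map (fun o => o.2.2),
                       l.dropWhile (fun o => o.1 == "add")) := by
  intro l; induction l with
  | nil => simp [pvCollectAdds]
  | cons o rest ih =>
      by_cases h : (o.1 == "add") = true
      · simp [pvCollectAdds, h, ih]
      · simp at h
        simp [pvCollectAdds, h]

-- each step only appends to the accumulated output
theorem pvStep_out (o : String × Option String × Option String)
    (out : List (String × Option String × Option String)) (p : List (Option String)) (b : Bool) :
    pvStep (out, p, b) o = (out ++ (pvStep ([], p, b) o).1, (pvStep ([], p, b) o).2) := by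
  unfold pvStep
  by_cases h1 : (o.1 == "del") = true
  · simp only [h1, if_true]; cases b <;> simp
  · simp only [h1, if_false]
    by_cases h2 : (o.1 == "add") = true
    · simp only [h2, if_true]
      cases p with
      | nil => cases b <;> simp
      | cons x xs => simp
    · simp [h2]

-- the accumulated output is a prefix the fold never touches
theorem foldl_out : ∀ (l : List (String × Option String × Option String)) (out : List (String × Option String × Option String)) (p : List (Option String)) (b : Bool),
    l.foldl pvStep (out, p, b) =
      (out ++ (l.foldl pvStep ([], p, b)).1, (l.foldl pvStep ([], p, b)).2) := by
  intro l; induction l with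
  | nil => intro out p b; simp
  | cons o rest ih =>
      intro out p b
      simp only [List.foldl_cons]
      rw [pvStep_out o out p b]
      cases hst : pvStep ([], p, b) o with
      | mk o1 rest1 =>
        cases rest1 with
        | mk p1 b1 =>
          rw [ih (out ++ o1) p1 b1, ih o1 p1 b1]
          simp

-- processing a run of dels just queues their left lines
theorem foldl_delrun : ∀ (d rest : List (String × Option String × Option String)) (out : List (String × Option String × Option String)) (p : List (Option String)),
    (∀ o ∈ d, o.1 = "del") →
    (d ++ rest).foldl pvStep (out, p, false) =
      rest.foldl pvStep (out, p ++ d.map (fun o => o.2.1), false) := by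
  intro d; induction d with
  | nil => intro rest out p _; simp
  | cons o ds ih =>
      intro rest out p hd
      have ho : (o.1 == "del") = true := by simp [hd o (by simp)]
      simp only [List.cons_append, List.foldl_cons]
      have hstep : pvStep (out, p, false) o = (out, p ++ [o.2.1], false) := by
        simp [pvStep, ho]
      rw [hstep, ih rest out (p ++ [o.2.1]) (fun x hx => hd x (by simp [hx]))]
      simp

-- processing a nonempty run of adds pairs them against the pending dels
theorem foldl_addrun : ∀ (a rest : List (String × Option String × Option String)) (out : List (String × Option String × Option String)) (p : List (Option String)) (b : Bool),
    (∀ o ∈ a, o.1 = "add") → a ≠ [] → (p ≠ [] ∨ b = true) →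
    (a ++ rest).foldl pvStep (out, p, b) =
      rest.foldl pvStep
        (out ++ List.zipWith pvRow p (a.map (fun o => o.2.2))
             ++ ((a.map (fun o => o.2.2)).drop p.length).map (fun r => pvRow none r),
         p.drop a.length, true) := by
  intro a; induction a with
  | nil => intro _ _ _ _ _ hne _; exact absurd rfl hne
  | cons o as ih =>
      intro rest out p b ha _ hpb
      have hoa : o.1 = "add" := ha o (by simp)
      have ho : (o.1 == "add") = true := by simp [hoa]
      have hod : (o.1 == "del") = false := by simp [hoa]
      simp only [List.cons_append, List.foldl_cons]
      cases p with
      | cons l ps =>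
          have hstep : pvStep (out, l :: ps, b) o = (out ++ [pvRow l o.2.2], ps, true) := by
            simp [pvStep, ho, hod]
          rw [hstep]
          cases has : as with
          | nil => subst has; simp
          | cons a2 as2 =>
              rw [← has]
              have hne2 : as ≠ [] := by simp [has]
              rw [ih rest (out ++ [pvRow l o.2.2]) ps true
                    (fun x hx => ha x (by simp [hx])) hne2 (Or.inr rfl)]
              simp
      | nil =>
          have hb : b = true := hpb.resolve_left (by simp)
          subst hb
          have hstep : pvStep (out, ([] : List (Option String)), true) o = (out ++ [pvRow none o.2.2], [], true) := by
            simp [pvStep, ho, hod]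
          rw [hstep]
          cases has : as with
          | nil => subst has; simp
          | cons a2 as2 =>
              rw [← has]
              have hne2 : as ≠ [] := by simp [has]
              rw [ih rest (out ++ [pvRow none o.2.2]) [] true
                    (fun x hx => ha x (by simp [hx])) hne2 (Or.inr rfl)]
              simp

-- at a block boundary (next op not an add, and not a del unless in_add) the
-- pending dels are flushed and the machine restarts fresh
theorem flush_boundary : ∀ (rest : List (String × Option String × Option String)) (out : List (String × Option String × Option String)) (p : List (Option String)) (b : Bool),
    (∀ o ∈ rest.head?, o.1 ≠ "add" ∧ (b = true ∨ o.1 ≠ "del")) →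
    pvFinish (rest.foldl pvStep (out, p, b))
      = out ++ p.map (fun l => pvRow l none) ++ pair_modifications_alt rest := by
  intro rest out p b hh
  cases rest with
  | nil => simp [pair_modifications_alt, pvFinish]
  | cons r rs =>
      obtain ⟨hra, hrd⟩ := hh r (by simp)
      simp only [List.foldl_cons, pair_modifications_alt]
      by_cases hd : r.1 = "del"
      · have hb : b = true := hrd.resolve_right (fun h => absurd hd h)
        subst hb
        have h1 : pvStep (out, p, true) r = (out ++ p.map (fun l => pvRow l none), [r.2.1], false) := by
          simp [pvStep, hd]
        have h2 : pvStep (([] : List (String × Option String × Option String)), [], false) r = ([], [r.2.1], false) := by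
          simp [pvStep, hd]
        rw [h1, h2, foldl_out rs (out ++ p.map (fun l => pvRow l none)) [r.2.1] false]
        cases hst : rs.foldl pvStep ([], [r.2.1], false) with
        | mk o1 q1 => simp [pvFinish]
      · have h1 : pvStep (out, p, b) r = (out ++ p.map (fun l => pvRow l none) ++ [r], [], false) := by
          simp [pvStep, hd, hra]
        have h2 : pvStep (([] : List (String × Option String × Option String)), [], false) r = ([r], [], false) := by
          simp [pvStep, hd, hra]
        rw [h1, h2, foldl_out rs (out ++ p.map (fun l => pvRow l none) ++ [r]) [] false,
            foldl_out rs [r] [] false]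
        cases hst : rs.foldl pvStep ([], [], false) with
        | mk o1 q1 => simp [pvFinish]

-- head of a dropWhile fails the predicate
theorem pvHeadDrop {alpha : Type} (P : alpha → Bool) : ∀ (l : List alpha) (o : alpha), (l.dropWhile P).head? = some o → P o = false := by
  intro l; induction l with
  | nil => intro o h; simp at h
  | cons x xs ih =>
      intro o h
      by_cases hx : P x = true
      · rw [List.dropWhile_cons, if_pos hx] at h; exact ih o h
      · rw [List.dropWhile_cons, if_neg hx] at h
        simp only [List.head?_cons, Option.some.injEq] at h
        rw [← h]; simpa using hx

-- if takeWhile strips nothing, dropWhile drops nothing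
theorem pvDropOfTakeNil {alpha : Type} (P : alpha → Bool) (l : List alpha) (h : l.takeWhile P = []) : l.dropWhile P = l := by
  cases l with
  | nil => simp
  | cons x xs =>
      have hx : P x = false := by
        by_contra hc
        have : P x = true := by revert hc; cases P x <;> simp
        rw [List.takeWhile_cons, if_pos this] at h; simp at h
      rw [List.dropWhile_cons, if_neg (by simp [hx])]

-- flushed leftovers commute: at most one of the two leftover lists is nonempty
theorem pair_comm (D V : List (Option String)) :
    pvPairB D V =
      List.zipWith pvRow D V
        ++ (V.drop D.length).map (fun r => pvRow none r)
        ++ (D.drop V.length).map (fun l => pvRow l none) := by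
  unfold pvPairB
  rcases Nat.le_total D.length V.length with h | h
  · rw [List.drop_eq_nil_of_le h]; simp
  · rw [List.drop_eq_nil_of_le (as := V) h]; simp

theorem main_eq : ∀ (ops : List (String × Option String × Option String)), pair_modifications ops = pair_modifications_alt ops := by
  have H : ∀ (n : ℕ) (ops : List (String × Option String × Option String)), ops.length ≤ n →
      pair_modifications ops = pair_modifications_alt ops := by
    intro n
    induction n with
    | zero =>
        intro ops h
        have : ops = [] := List.eq_nil_of_length_eq_zero (Nat.le_zero.mp h)
        subst this
        simp [pair_modifications, pair_modifications_alt, pvFinish]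
    | succ n ih =>
        intro ops hlen
        cases ops with
        | nil => simp [pair_modifications, pair_modifications_alt, pvFinish]
        | cons op rest =>
            by_cases hdel : op.1 = "del"
            · -- A: collect the del run, then the add run, pair, recurse
              rw [pair_modifications]
              simp only [beq_iff_eq, hdel, dite_true]
              rw [collectDels_eq]
              simp only [List.takeWhile_cons, List.dropWhile_cons, beq_iff_eq, hdel, if_true,
                List.map_cons]
              rw [collectAdds_eq]
              -- names for the pieces
              set dtl := rest.takeWhile (fun o => o.1 == "del") with hdtl
              set mid := rest.dropWhile (fun o => o.1 == "del") with hmid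
              set arun := mid.takeWhile (fun o => o.1 == "add") with harun
              set rest2 := mid.dropWhile (fun o => o.1 == "add") with hrest2
              -- B: the stream is delrun ++ arun ++ rest2
              have hsplit : op :: rest = (op :: dtl) ++ arun ++ rest2 := by
                rw [hdtl, harun, hrest2, hmid]
                simp [List.takeWhile_append_dropWhile]
              rw [pair_modifications_alt]
              conv_rhs => rw [hsplit]
              simp only [List.append_assoc]
              have hdall : ∀ o ∈ op :: dtl, o.1 = "del" := by
                intro o hod
                rcases List.mem_cons.mp hod with h | h
                · rw [h]; exact hdel
                · have := List.mem_takeWhile_imp h; simpa using this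
              rw [foldl_delrun (op :: dtl) (arun ++ rest2) [] [] hdall]
              set D : List (Option String) := op.2.1 :: dtl.map (fun o => o.2.1) with hD
              have hDeq : [] ++ (op :: dtl).map (fun o => o.2.1) = D := by simp [hD]
              rw [hDeq]
              have haall : ∀ o ∈ arun, o.1 = "add" := by
                intro o hoa
                have := List.mem_takeWhile_imp hoa; simpa using this
              have hr2len : rest2.length ≤ n := by
                have h1 : mid.length ≤ rest.length := by
                  rw [hmid]; exact List.length_dropWhile_le _ _
                have h2 : rest2.length ≤ mid.length := by
                  rw [hrest2]; exact List.length_dropWhile_le _ _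
                simp only [List.length_cons] at hlen
                omega
              have hr2head : ∀ o ∈ rest2.head?, o.1 ≠ "add" := by
                intro o ho
                have := pvHeadDrop (fun o => o.1 == "add") mid o (by rw [← hrest2]; exact ho)
                simpa using this
              by_cases hemp : arun = []
              · -- no adds: every pending del becomes a del row
                have hr2eq : rest2 = mid := by
                  rw [hrest2]
                  exact pvDropOfTakeNil _ mid (by rw [← harun, hemp])
                have hr2headd : ∀ o ∈ rest2.head?, o.1 ≠ "del" := by
                  intro o ho
                  rw [hr2eq] at ho
                  have := pvHeadDrop (fun o => o.1 == "del") rest o (by rw [← hmid]; exact ho)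
                  simpa using this
                have hfb := flush_boundary rest2 [] D false
                  (by intro o ho; exact ⟨hr2head o ho, Or.inr (hr2headd o ho)⟩)
                simp only [List.nil_append] at hfb
                rw [hemp]
                simp only [List.nil_append, List.map_nil]
                rw [hfb, pairAB_eq]
                simp only [pvPairB, List.zipWith_nil_right, List.length_nil, List.drop_zero,
                  List.drop_nil, List.map_nil, List.nil_append, List.append_nil]
                rw [ih rest2 hr2len]
              · -- adds follow: pair them against the queued dels
                have hDne : D ≠ [] := by simp [hD]
                rw [foldl_addrun arun rest2 [] D false haall hemp (Or.inl hDne)]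
                set V : List (Option String) := arun.map (fun o => o.2.2) with hV
                have hfb := flush_boundary rest2
                  ([] ++ List.zipWith pvRow D V ++ (V.drop D.length).map (fun r => pvRow none r))
                  (D.drop arun.length) true
                  (by intro o ho; exact ⟨hr2head o ho, Or.inl rfl⟩)
                rw [hfb]
                have hVlen : V.length = arun.length := by simp [hV]
                rw [pairAB_eq, pair_comm, ih rest2 hr2len, ← hVlen]
                simp
            · -- non-del head: both copy the op and continue
              rw [pair_modifications]
              simp only [beq_iff_eq, hdel, dite_false]
              rw [pair_modifications_alt]
              simp only [List.foldl_cons]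
              have hstep : pvStep (([] : List (String × Option String × Option String)), [], false) op = ([op], [], false) := by
                by_cases ha : op.1 = "add" <;> simp [pvStep, hdel, ha]
              rw [hstep, foldl_out rest [op] [] false]
              have hlen2 : rest.length ≤ n := by simp only [List.length_cons] at hlen; omega
              rw [ih rest hlen2, pair_modifications_alt]
              cases hst : rest.foldl pvStep ([], [], false) with
              | mk o1 q1 => simp [pvFinish]
  intro ops; exact H ops.length ops le_rfl

-- ===== VERDICT (by name: the statement is the Claim_ definition above) =====
theorem pair_modifications_spec : Claim_equal_pair_modifications := by
  intro ops _; unfold Spec_pair_modifications; exact main_eq ops
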